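-- pv_equiv track=rewrite | github.com/manavneema/Experiment-2 | Casual discovery/causal_discovery_utils.py | generate_stage_blacklist
-- ===== SOURCE A (Python) =====
-- def generate_stage_blacklist(metric_cols):
--     """
--     Generate blacklist pairs enforcing pipeline flow direction.
--
--     Rules: raw → bronze → silver (forbids reverse edges)
--
--     Args:
--         metric_cols: Iterable of metric column names
--
--     Returns:
--         list: List of (from, to) tuples to blacklist
--     """
--     blacklist = []
--     cols = list(metric_cols)
--     for a in cols:
--         for b in cols:
--             if a == b:
--                 continue
--             if a.startswith('silver_') and (b.startswith('bronze_') or b.startswith('raw_')):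
--                 blacklist.append((a, b))
--             if a.startswith('bronze_') and b.startswith('raw_'):
--                 blacklist.append((a, b))
--     return blacklist
-- ===== SOURCE B (Python) =====
-- def generate_stage_blacklist(metric_cols):
--     """
--     Generate blacklist pairs enforcing pipeline flow direction.
--
--     Rules: raw -> bronze -> silver (forbids reverse edges)
--
--     Precompute the target lists once (bronze/raw targets for silver sources,
--     raw targets for bronze sources), then emit pairs in a single pass over
--     the sources.  A source and a target can never be the same string since
--     their prefixes differ, so no equality check is needed.
--     """
--     cols = list(metric_cols)
--     bronze_or_raw = [b for b in cols if b.startswith('bronze_') or b.startswith('raw_')]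
--     raw = [b for b in cols if b.startswith('raw_')]
--     blacklist = []
--     for a in cols:
--         if a.startswith('silver_'):
--             blacklist.extend((a, b) for b in bronze_or_raw)
--         elif a.startswith('bronze_'):
--             blacklist.extend((a, b) for b in raw)
--     return blacklist
-- ===== Notes on version B (the rewrite author's own statement) =====
-- stated objective: faster
-- what changed: Replaces the all-pairs double loop with one pass that precomputes the bronze/raw and raw target lists and extends the result only for qualifying silver/bronze sources; the a==b check disappears because prefixes guarantee distinctness.
import Mathlib
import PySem

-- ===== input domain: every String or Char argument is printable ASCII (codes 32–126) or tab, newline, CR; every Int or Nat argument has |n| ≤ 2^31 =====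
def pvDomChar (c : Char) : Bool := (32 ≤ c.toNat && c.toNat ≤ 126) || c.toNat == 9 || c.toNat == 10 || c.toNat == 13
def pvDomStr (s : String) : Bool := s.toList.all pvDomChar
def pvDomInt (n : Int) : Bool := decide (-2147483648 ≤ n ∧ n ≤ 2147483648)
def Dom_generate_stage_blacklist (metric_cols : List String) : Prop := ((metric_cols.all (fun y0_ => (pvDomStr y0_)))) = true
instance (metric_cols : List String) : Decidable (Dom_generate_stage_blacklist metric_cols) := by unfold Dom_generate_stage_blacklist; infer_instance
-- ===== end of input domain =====

-- B replaces A's all-pairs double loop by precomputing the target lists once and emitting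
-- pairs in a single pass over qualifying sources (O(n + output) instead of O(n^2)).

-- ===== PORT A =====
def generate_stage_blacklist (metric_cols : List String) : List (String × String) :=
  let cols := metric_cols
  cols.foldl (fun blacklist a =>
    cols.foldl (fun blacklist b =>
      if a == b then blacklist
      else
        let blacklist :=
          if PySem.Str.startswith a "silver_" &&
             (PySem.Str.startswith b "bronze_" || PySem.Str.startswith b "raw_") then
            blacklist ++ [(a, b)]
          else blacklist
        if PySem.Str.startswith a "bronze_" && PySem.Str.startswith b "raw_" then
          blacklist ++ [(a, b)]
        else blacklist) blacklist) []

-- ===== PORT B =====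
def generate_stage_blacklist_alt (metric_cols : List String) : List (String × String) :=
  let cols := metric_cols
  let bronze_or_raw := cols.filter
    (fun b => PySem.Str.startswith b "bronze_" || PySem.Str.startswith b "raw_")
  let raw := cols.filter (fun b => PySem.Str.startswith b "raw_")
  cols.foldl (fun blacklist a =>
    if PySem.Str.startswith a "silver_" then
      blacklist ++ bronze_or_raw.map (fun b => (a, b))
    else if PySem.Str.startswith a "bronze_" then
      blacklist ++ raw.map (fun b => (a, b))
    else blacklist) []

-- ===== PRECONDITION & SPEC =====
def Spec_generate_stage_blacklist (metric_cols : List String) (out : List (String × String)) : Prop := out = generate_stage_blacklist_alt metric_cols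
instance (metric_cols : List String) (out : List (String × String)) : Decidable (Spec_generate_stage_blacklist metric_cols out) := by unfold Spec_generate_stage_blacklist; infer_instance

-- ===== CLAIM (what is proved, stated in full; the proofs are below) =====
def Claim_equal_generate_stage_blacklist : Prop := ∀ (metric_cols : List String), Dom_generate_stage_blacklist metric_cols → Spec_generate_stage_blacklist metric_cols (generate_stage_blacklist metric_cols)

-- ===== LEMMAS AND PROOFS =====

-- startswith determines the first character
theorem pv_head_of_startswith (a p : String) (c : Char) (cs : List Char)
    (hp : p.toList = c :: cs) (h : PySem.Str.startswith a p = true) :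
    a.toList.head? = some c := by
  rw [PySem.Str.startswith_eq, PySem.Chars.startswith_iff] at h
  obtain ⟨t, ht⟩ := h
  rw [← ht, hp]
  rfl

-- the three prefixes are pairwise incompatible (heads differ)
theorem pv_silver_not_bronze (a : String) (h1 : PySem.Str.startswith a "silver_" = true)
    (h2 : PySem.Str.startswith a "bronze_" = true) : False := by
  have e1 := pv_head_of_startswith a "silver_" 's' "ilver_".toList rfl h1
  have e2 := pv_head_of_startswith a "bronze_" 'b' "ronze_".toList rfl h2
  rw [e1] at e2; simp at e2

theorem pv_silver_not_raw (a : String) (h1 : PySem.Str.startswith a "silver_" = true)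
    (h2 : PySem.Str.startswith a "raw_" = true) : False := by
  have e1 := pv_head_of_startswith a "silver_" 's' "ilver_".toList rfl h1
  have e2 := pv_head_of_startswith a "raw_" 'r' "aw_".toList rfl h2
  rw [e1] at e2; simp at e2

theorem pv_bronze_not_raw (a : String) (h1 : PySem.Str.startswith a "bronze_" = true)
    (h2 : PySem.Str.startswith a "raw_" = true) : False := by
  have e1 := pv_head_of_startswith a "bronze_" 'b' "ronze_".toList rfl h1
  have e2 := pv_head_of_startswith a "raw_" 'r' "aw_".toList rfl h2
  rw [e1] at e2; simp at e2

-- A's inner loop over l, characterised as an append of a filtered map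
theorem pv_inner (a : String) (l : List String) (bl : List (String × String)) :
    l.foldl (fun blacklist b =>
      if a == b then blacklist
      else
        let blacklist :=
          if PySem.Str.startswith a "silver_" &&
             (PySem.Str.startswith b "bronze_" || PySem.Str.startswith b "raw_") then
            blacklist ++ [(a, b)]
          else blacklist
        if PySem.Str.startswith a "bronze_" && PySem.Str.startswith b "raw_" then
          blacklist ++ [(a, b)]
        else blacklist) bl
    = bl ++ (if PySem.Str.startswith a "silver_" then
               (l.filter (fun b => PySem.Str.startswith b "bronze_" || PySem.Str.startswith b "raw_")).map (fun b => (a, b))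
             else if PySem.Str.startswith a "bronze_" then
               (l.filter (fun b => PySem.Str.startswith b "raw_")).map (fun b => (a, b))
             else []) := by
  induction l generalizing bl with
  | nil => simp
  | cons b l ih =>
    simp only [List.foldl_cons, List.filter_cons]
    by_cases hab : a = b
    · subst hab
      rw [ih]
      by_cases hs : PySem.Str.startswith a "silver_" = true
      · have hb : PySem.Str.startswith a "bronze_" = false := by
          by_contra h; exact pv_silver_not_bronze a hs (by simpa using h)
        have hr : PySem.Str.startswith a "raw_" = false := by
          by_contra h; exact pv_silver_not_raw a hs (by simpa using h)
        simp at hs hb hr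
        simp [hs, hb, hr]
      · by_cases hbz : PySem.Str.startswith a "bronze_" = true
        · have hr : PySem.Str.startswith a "raw_" = false := by
            by_contra h; exact pv_bronze_not_raw a hbz (by simpa using h)
          simp at hs hbz hr
          simp [hs, hbz, hr]
        · simp at hs hbz
          simp [hs, hbz]
    · have hne : (a == b) = false := by simpa using hab
      rw [hne]
      simp only [Bool.false_eq_true, if_false]
      rw [ih]
      by_cases hs : PySem.Str.startswith a "silver_" = true
      · have hb : PySem.Str.startswith a "bronze_" = false := by
          by_contra h; exact pv_silver_not_bronze a hs (by simpa using h)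
        by_cases ht : (PySem.Str.startswith b "bronze_" || PySem.Str.startswith b "raw_") = true
        · simp at hs hb ht
          simp [hs, hb, ht]
        · simp at hs hb ht
          simp [hs, hb, ht]
      · by_cases hbz : PySem.Str.startswith a "bronze_" = true
        · by_cases ht : PySem.Str.startswith b "raw_" = true
          · simp at hs hbz ht
            simp [hs, hbz, ht]
          · simp at hs hbz ht
            simp [hs, hbz, ht]
        · simp at hs hbz
          simp [hs, hbz]

-- ===== VERDICT (by name: the statement is the Claim_ definition above) =====
theorem generate_stage_blacklist_spec : Claim_equal_generate_stage_blacklist := by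
  intro cols _
  unfold Spec_generate_stage_blacklist generate_stage_blacklist generate_stage_blacklist_alt
  simp only
  have hf : (fun (blacklist : List (String × String)) (a : String) =>
      cols.foldl (fun blacklist b =>
        if a == b then blacklist
        else
          let blacklist :=
            if PySem.Str.startswith a "silver_" &&
               (PySem.Str.startswith b "bronze_" || PySem.Str.startswith b "raw_") then
              blacklist ++ [(a, b)]
            else blacklist
          if PySem.Str.startswith a "bronze_" && PySem.Str.startswith b "raw_" then
            blacklist ++ [(a, b)]
          else blacklist) blacklist)
      = (fun (blacklist : List (String × String)) (a : String) =>
        if PySem.Str.startswith a "silver_" then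
          blacklist ++ (cols.filter (fun b => PySem.Str.startswith b "bronze_" || PySem.Str.startswith b "raw_")).map (fun b => (a, b))
        else if PySem.Str.startswith a "bronze_" then
          blacklist ++ (cols.filter (fun b => PySem.Str.startswith b "raw_")).map (fun b => (a, b))
        else blacklist) := by
    funext bl a
    rw [pv_inner]
    by_cases hs : PySem.Str.startswith a "silver_" = true
    · simp at hs
      simp [hs]
    · by_cases hbz : PySem.Str.startswith a "bronze_" = true
      · simp at hs hbz
        simp [hs, hbz]
      · simp at hs hbz
        simp [hs, hbz]
  rw [hf]
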